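-- pv_equiv track=rewrite | github.com/nohda/codingTest | programmers/해시|탐욕|정렬/방울.py | solution
-- ===== SOURCE A (Python) =====
-- from itertools import accumulate
--
-- def solution(bell):
--     coors_start = {}
--     coors_end = {}
--     for i, x in enumerate(accumulate([0] + [-1 if b == 1 else 1 for b in bell])):
--         if x not in coors_start:
--             coors_start[x] = i
--         coors_end[x] = i
--     return max(coors_end[x] - coors_start[x] for x in coors_end)
-- ===== SOURCE B (Python) =====
-- def solution(bell):
--     # Sort-based algorithm: build the prefix list, sort (value, index) pairs
--     # lexicographically, then one linear scan over the sorted pairs measures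
--     # each run of equal values (indices ascend within a run, so the span of a
--     # run is last-seen index minus the run's first index). No dict at all.
--     prefix = [0]
--     s = 0
--     for b in bell:
--         s += -1 if b == 1 else 1
--         prefix.append(s)
--     pairs = sorted((v, i) for i, v in enumerate(prefix))
--     best = 0
--     v0, start = pairs[0]
--     for v, i in pairs[1:]:
--         if v != v0:
--             v0, start = v, i
--         elif i - start > best:
--             best = i - start
--     return best
-- ===== Notes on version B (the rewrite author's own statement) =====
-- stated objective: alternative
-- what changed: B drops A's two hash maps entirely: it sorts the (prefix value, index) pairs lexicographically and measures each run of equal values in one linear scan of the sorted list, instead of A's dict-of-first-index / dict-of-last-index pass followed by a max-over-keys reduction.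
import Mathlib
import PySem

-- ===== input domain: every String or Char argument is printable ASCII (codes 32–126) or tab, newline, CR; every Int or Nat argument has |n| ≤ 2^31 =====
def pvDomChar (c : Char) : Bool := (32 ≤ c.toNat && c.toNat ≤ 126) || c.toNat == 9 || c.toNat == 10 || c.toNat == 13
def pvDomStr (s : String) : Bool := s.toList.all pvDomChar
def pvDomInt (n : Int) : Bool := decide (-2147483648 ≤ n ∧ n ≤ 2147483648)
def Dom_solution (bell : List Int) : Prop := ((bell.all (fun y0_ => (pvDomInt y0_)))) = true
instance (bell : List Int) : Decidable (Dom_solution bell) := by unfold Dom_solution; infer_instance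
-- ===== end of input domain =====

-- B replaces A's two hash maps (first and last index per prefix value, then a
-- max-over-keys reduction) by a sort of the (prefix value, index) pairs followed
-- by one linear scan measuring each run of equal values (objective: alternative).

-- ===== PORT A =====
-- itertools.accumulate on a list whose head is kept and then running sums
def pvAccumFrom (acc : Int) : List Int → List Int
  | [] => []
  | x :: xs => (acc + x) :: pvAccumFrom (acc + x) xs

def pvAccumulate : List Int → List Int
  | [] => []
  | x :: xs => x :: pvAccumFrom x xs

-- loop body of A: update coors_start (only if key absent) and coors_end (always)
def pvAStep (st : PySem.Dict Int Int × PySem.Dict Int Int) (p : Int × Int) :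
    PySem.Dict Int Int × PySem.Dict Int Int :=
  ((if st.1.contains p.2 then st.1 else st.1.insert p.2 p.1), st.2.insert p.2 p.1)

def solution (bell : List Int) : Int :=
  let st := (PySem.List.enumerate (pvAccumulate ((0 : Int) :: bell.map (fun b => if b == 1 then -1 else 1))) 0).foldl
      pvAStep (PySem.Dict.empty, PySem.Dict.empty)
  -- the accumulated list starts with 0, so the generator is nonempty and Python's max never raises;
  -- .getD 0 is therefore unreachable
  (PySem.List.max? (st.2.keys.map (fun x => st.2.getD x 0 - st.1.getD x 0)) (fun v => v)).getD 0

-- ===== PORT B =====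
-- loop body of B's prefix build: state (prefix, s)
def pvBuild (st : List Int × Int) (b : Int) : List Int × Int :=
  let s := st.2 + (if b == 1 then -1 else 1)
  (st.1 ++ [s], s)

-- loop body of B's scan over the sorted pairs: state (v0, start, best)
def pvScanStep (st : Int × Int × Int) (p : Int × Int) : Int × Int × Int :=
  if p.1 != st.1 then (p.1, p.2, st.2.2)
  else if p.2 - st.2.1 > st.2.2 then (st.1, st.2.1, p.2 - st.2.1)
  else st

def solution_alt (bell : List Int) : Int :=
  let pref := (bell.foldl pvBuild ([(0 : Int)], 0)).1
  let pairs := PySem.List.sorted2 ((PySem.List.enumerate pref 0).map (fun p => (p.2, p.1)))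
      (fun p => p.1) (fun p => p.2)
  -- pairs[0]: pref always contains 0, so pairs ≠ [] and Python's pairs[0] never raises;
  -- the default below is therefore unreachable
  let h := PySem.List.pyGetD pairs 0 ((0 : Int), (0 : Int))
  ((PySem.List.slice pairs (some 1) none).foldl pvScanStep (h.1, h.2, 0)).2.2

-- ===== PRECONDITION & SPEC =====
def Spec_solution (bell : List Int) (out : Int) : Prop := out = solution_alt bell
instance (bell : List Int) (out : Int) : Decidable (Spec_solution bell out) := by unfold Spec_solution; infer_instance

-- ===== CLAIM (what is proved, stated in full; the proofs are below) =====
def Claim_equal_solution : Prop := ∀ (bell : List Int), Dom_solution bell → Spec_solution bell (solution bell)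

-- ===== LEMMAS AND PROOFS =====

-- The common reference objects, over the prefix list P
def pvPairs (P : List Int) : List (Int × Int) :=
  (PySem.List.enumerate P 0).map (fun p => (p.2, p.1))

def pvBlk (P : List Int) (v : Int) : List (Int × Int) :=
  (pvPairs P).filter (fun p => p.1 == v)

def pvFirst (P : List Int) (v : Int) : Int := ((pvBlk P v).headD (0, 0)).2
def pvLast (P : List Int) (v : Int) : Int := ((pvBlk P v).getLastD (0, 0)).2
def pvSpan (P : List Int) (v : Int) : Int := pvLast P v - pvFirst P v

def pvD (P : List Int) : List Int := PySem.List.sorted (PySem.Set.ofList P) (fun x => x)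
def pvT (P : List Int) : List (Int × Int) := (pvD P).flatMap (pvBlk P)

-- the comparison sorted2 uses for key (p.1, p.2)
def pvLex (p q : Int × Int) : Bool :=
  decide (p.1 < q.1) || (!decide (q.1 < p.1) && decide (p.2 < q.2))

-- ---- prefix list: B's build loop equals A's accumulate ----
lemma pvBuild_eq (l : List Int) : ∀ (pre : List Int) (s : Int),
    (l.foldl pvBuild (pre, s)).1 = pre ++ pvAccumFrom s (l.map (fun b => if b == 1 then -1 else 1)) := by
  induction l with
  | nil => intro pre s; simp [pvAccumFrom]
  | cons b rest ih =>
    intro pre s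
    simp only [List.foldl_cons, List.map_cons, pvAccumFrom, pvBuild]
    rw [ih]
    simp


-- ---- basic facts about pvPairs ----
lemma pvPairs_pw (P : List Int) : (pvPairs P).Pairwise (fun p q => p.2 < q.2) := by
  unfold pvPairs
  rw [List.pairwise_map]
  have h1 : ((PySem.List.enumerate P 0).map (fun p => p.1)).Pairwise (· < ·) := by
    rw [PySem.List.map_fst_enumerate]
    exact PySem.List.pairwise_lt_pyRange_one 0 (0 + P.length)
  rw [List.pairwise_map] at h1
  exact h1


lemma pvPairs_nodup (P : List Int) : (pvPairs P).Nodup := by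
  have h := pvPairs_pw P
  have h2 : (pvPairs P).Pairwise (· ≠ ·) := h.imp (fun hlt he => by rw [he] at hlt; omega)
  exact h2


lemma pvPairs_map_fst (P : List Int) : (pvPairs P).map (fun p => p.1) = P := by
  unfold pvPairs
  rw [List.map_map]
  exact PySem.List.map_snd_enumerate P 0


lemma pvBlk_ne_nil (P : List Int) (v : Int) (hv : v ∈ P) : pvBlk P v ≠ [] := by
  rw [← pvPairs_map_fst P] at hv
  obtain ⟨p, hp, hpv⟩ := List.mem_map.1 hv
  unfold pvBlk
  intro hnil
  rw [List.filter_eq_nil_iff] at hnil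
  exact hnil p hp (by simp [hpv])


lemma pvBlk_fst (P : List Int) (v : Int) : ∀ p ∈ pvBlk P v, p.1 = v := by
  intro p hp
  unfold pvBlk at hp
  have := (List.mem_filter.1 hp).2
  simpa using this


lemma pvBlk_pw (P : List Int) (v : Int) : (pvBlk P v).Pairwise (fun p q => p.2 < q.2) := by
  exact List.Pairwise.sublist (List.filter_sublist) (pvPairs_pw P)


-- ---- pvD: sorted distinct values ----
lemma pvD_pw (P : List Int) : (pvD P).Pairwise (· < ·) := by
  exact PySem.List.sorted_ofList_pairwise_lt P


lemma pvD_mem (P : List Int) (v : Int) : v ∈ pvD P ↔ v ∈ P := by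
  unfold pvD
  rw [PySem.List.mem_sorted]
  exact PySem.Set.mem_ofList (xs := P) (y := v)


-- ---- lex order properties ----
lemma pvLex_trans {p q r : Int × Int} (h1 : pvLex p q = true) (h2 : pvLex q r = true) :
    pvLex p r = true := by
  unfold pvLex at *
  simp only [Bool.or_eq_true, Bool.and_eq_true, Bool.not_eq_true', decide_eq_true_eq,
    decide_eq_false_iff_not] at *
  omega

lemma pvLex_total {p q : Int × Int} (h : p ≠ q) : pvLex p q = true ∨ pvLex q p = true := by
  rcases p with ⟨a, b⟩; rcases q with ⟨c, d⟩
  unfold pvLex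
  simp only [Bool.or_eq_true, Bool.and_eq_true, Bool.not_eq_true', decide_eq_true_eq,
    decide_eq_false_iff_not]
  by_cases hac : a = c
  · have hbd : b ≠ d := by intro hb; exact h (by rw [hac, hb])
    omega
  · omega

lemma pvLex_asymm {p q : Int × Int} (h1 : pvLex p q = true) (h2 : pvLex q p = true) : False := by
  unfold pvLex at *
  simp only [Bool.or_eq_true, Bool.and_eq_true, Bool.not_eq_true', decide_eq_true_eq,
    decide_eq_false_iff_not] at *
  omega

-- ---- insertion sort with distinct elements: pairwise and uniqueness ----
lemma pvIns_pw (x : Int × Int) (ys : List (Int × Int)) (hx : x ∉ ys)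
    (h : ys.Pairwise (fun a b => pvLex a b = true)) :
    (PySem.List.insertBy pvLex x ys).Pairwise (fun a b => pvLex a b = true) := by
  induction ys with
  | nil => simp [PySem.List.insertBy]
  | cons y t ih =>
    have hxy : x ≠ y := by intro he; exact hx (he ▸ List.mem_cons_self)
    have hxt : x ∉ t := fun hm => hx (List.mem_cons_of_mem y hm)
    obtain ⟨hh, ht⟩ := List.pairwise_cons.1 h
    by_cases hb : pvLex x y = true
    · rw [show PySem.List.insertBy pvLex x (y :: t) = x :: y :: t from by
        simp [PySem.List.insertBy, hb]]
      refine List.pairwise_cons.2 ⟨?_, h⟩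
      intro z hz
      rcases List.mem_cons.1 hz with rfl | hz'
      · exact hb
      · exact pvLex_trans hb (hh z hz')
    · rw [show PySem.List.insertBy pvLex x (y :: t) = y :: PySem.List.insertBy pvLex x t from by
        simp [PySem.List.insertBy, hb]]
      refine List.pairwise_cons.2 ⟨?_, ih hxt ht⟩
      intro z hz
      rw [PySem.List.insertBy_mem_iff] at hz
      rcases hz with rfl | hz'
      · rcases pvLex_total hxy with h1 | h1
        · exact absurd h1 hb
        · exact h1
      · exact hh z hz'

lemma pvFoldIns_pw (xs : List (Int × Int)) : ∀ (acc : List (Int × Int)),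
    (acc ++ xs).Nodup → acc.Pairwise (fun a b => pvLex a b = true) →
    (xs.foldl (fun acc x => PySem.List.insertBy pvLex x acc) acc).Pairwise
      (fun a b => pvLex a b = true) := by
  induction xs with
  | nil => intro acc _ hp; simpa using hp
  | cons x t ih =>
    intro acc hnd hp
    simp only [List.foldl_cons]
    have hxacc : x ∉ acc := by
      intro hm
      exact (List.nodup_append.1 hnd).2.2 x hm x List.mem_cons_self rfl
    have hperm : (PySem.List.insertBy pvLex x acc ++ t).Perm (acc ++ x :: t) := by
      exact ((PySem.List.insertBy_perm pvLex x acc).append_right t).trans List.perm_middle.symm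
    exact ih (PySem.List.insertBy pvLex x acc) (hperm.nodup_iff.2 hnd) (pvIns_pw x acc hxacc hp)

-- partition of a pair list by the (distinct) values of the first components
lemma pvPartition : ∀ (D : List Int) (ps : List (Int × Int)), D.Nodup →
    (∀ p ∈ ps, p.1 ∈ D) →
    ps.Perm (D.flatMap (fun v => ps.filter (fun p => p.1 == v))) := by
  intro D
  induction D with
  | nil =>
    intro ps _ h
    cases ps with
    | nil => simp
    | cons p t => exact absurd (h p List.mem_cons_self) (by simp)
  | cons v D' ih =>
    intro ps hnd hmem
    simp only [List.flatMap_cons]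
    refine ((List.filter_append_perm (fun p => p.1 == v) ps).symm).trans ?_
    apply List.Perm.append_left
    have hmem' : ∀ p ∈ ps.filter (fun p => !(p.1 == v)), p.1 ∈ D' := by
      intro p hp
      obtain ⟨hpm, hpv⟩ := List.mem_filter.1 hp
      rcases List.mem_cons.1 (hmem p hpm) with h | h
      · exfalso; rw [h] at hpv; simp at hpv
      · exact h
    refine (ih (ps.filter (fun p => !(p.1 == v))) (List.Nodup.of_cons hnd) hmem').trans ?_
    apply List.Perm.of_eq
    apply List.flatMap_congr
    intro w hw
    have hvw : w ≠ v := by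
      intro he
      exact (List.nodup_cons.1 hnd).1 (he ▸ hw)
    rw [List.filter_filter]
    apply List.filter_congr
    intro p _
    by_cases hpw : p.1 = w
    · simp [hpw, hvw]
    · simp [hpw]

lemma pvT_pw (P : List Int) : (pvT P).Pairwise (fun a b => pvLex a b = true) := by
  unfold pvT
  rw [List.pairwise_flatMap]
  constructor
  · intro v hv
    refine List.Pairwise.imp_of_mem ?_ (pvBlk_pw P v)
    intro a b ha hb hlt
    have ha1 := pvBlk_fst P v a ha
    have hb1 := pvBlk_fst P v b hb
    unfold pvLex
    simp only [Bool.or_eq_true, Bool.and_eq_true, Bool.not_eq_true', decide_eq_true_eq,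
      decide_eq_false_iff_not]
    omega
  · refine (pvD_pw P).imp ?_
    intro v w hvw x hx y hy
    have hx1 := pvBlk_fst P v x hx
    have hy1 := pvBlk_fst P w y hy
    unfold pvLex
    simp only [Bool.or_eq_true, Bool.and_eq_true, Bool.not_eq_true', decide_eq_true_eq,
      decide_eq_false_iff_not]
    omega

lemma pvT_perm (P : List Int) : (pvPairs P).Perm (pvT P) := by
  have hnd : (pvD P).Nodup := (pvD_pw P).nodup
  have hmem : ∀ p ∈ pvPairs P, p.1 ∈ pvD P := by
    intro p hp
    rw [pvD_mem]
    rw [← pvPairs_map_fst P]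
    exact List.mem_map_of_mem hp
  exact pvPartition (pvD P) (pvPairs P) hnd hmem

lemma pvSorted2_eq_T (P : List Int) :
    PySem.List.sorted2 (pvPairs P) (fun p => p.1) (fun p => p.2) = pvT P := by
  have heq : PySem.List.sorted2 (pvPairs P) (fun p => p.1) (fun p => p.2)
      = (pvPairs P).foldl (fun acc x => PySem.List.insertBy pvLex x acc) [] := rfl
  rw [heq]
  have hperm : ((pvPairs P).foldl (fun acc x => PySem.List.insertBy pvLex x acc) []).Perm
      (pvPairs P) := by
    simpa using PySem.List.foldl_insertBy_perm pvLex (pvPairs P) []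
  have hpw := pvFoldIns_pw (pvPairs P) [] (by simpa using pvPairs_nodup P) (by simp)
  exact List.Perm.eq_of_pairwise
    (fun a b _ _ h1 h2 => (pvLex_asymm h1 h2).elim)
    hpw (pvT_pw P) (hperm.trans (pvT_perm P))

-- ---- the scan over the sorted pairs ----
lemma pvScan_run (v i0 : Int) : ∀ (l : List (Int × Int)) (b : Int), (∀ p ∈ l, p.1 = v) →
    l.foldl pvScanStep (v, i0, b) = (v, i0, l.foldl (fun acc p => max acc (p.2 - i0)) b) := by
  intro l
  induction l with
  | nil => intro b _; rfl
  | cons p t ih =>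
    intro b hv
    have hp1 : p.1 = v := hv p List.mem_cons_self
    simp only [List.foldl_cons]
    have hstep : pvScanStep (v, i0, b) p = (v, i0, max b (p.2 - i0)) := by
      unfold pvScanStep
      dsimp only
      rw [if_neg (by simp [hp1])]
      split_ifs with hc
      · rw [max_eq_right (by omega)]
      · rw [max_eq_left (by omega)]
    rw [hstep, ih (max b (p.2 - i0)) (fun q hq => hv q (List.mem_cons_of_mem p hq))]

-- in a list whose second components increase, the last one bounds them all
lemma pvLastD_max : ∀ (l : List (Int × Int)) (d : Int × Int),
    l.Pairwise (fun p q => p.2 < q.2) → ∀ p ∈ l, p.2 ≤ (l.getLastD d).2 := by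
  intro l
  induction l with
  | nil => simp
  | cons a t ih =>
    intro d hpw p hp
    rw [List.getLastD_cons]
    obtain ⟨hhead, htail⟩ := List.pairwise_cons.1 hpw
    rcases List.mem_cons.1 hp with h | h
    · subst h
      cases t with
      | nil => simp
      | cons q t' =>
        have h1 := ih p htail q List.mem_cons_self
        have h2 := hhead q List.mem_cons_self
        omega
    · exact ih a htail p h

lemma pvGetLastD_congr (l : List (Int × Int)) (h : l ≠ []) (d d' : Int × Int) :
    l.getLastD d = l.getLastD d' := by
  rw [List.getLastD_eq_getLast?, List.getLastD_eq_getLast?]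
  cases hq : l.getLast? with
  | none => exact absurd (List.getLast?_eq_none_iff.1 hq) h
  | some x => rfl

lemma pvSpan_nonneg (P : List Int) (v : Int) (hv : v ∈ P) : 0 ≤ pvSpan P v := by
  have hne := pvBlk_ne_nil P v hv
  obtain ⟨h0, t, he⟩ := List.exists_cons_of_ne_nil hne
  have h1 := pvLastD_max (pvBlk P v) (0, 0) (pvBlk_pw P v) h0 (he ▸ List.mem_cons_self)
  unfold pvSpan pvFirst pvLast
  rw [he] at h1 ⊢
  simp only [List.headD_cons]
  omega

lemma pvFoldMax_last : ∀ (l : List (Int × Int)) (b i0 : Int) (d : Int × Int), l ≠ [] →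
    l.Pairwise (fun p q => p.2 < q.2) →
    l.foldl (fun acc p => max acc (p.2 - i0)) b = max b ((l.getLastD d).2 - i0) := by
  intro l
  induction l with
  | nil => intro _ _ _ h; exact absurd rfl h
  | cons a t ih =>
    intro b i0 d _ hpw
    obtain ⟨hhead, htail⟩ := List.pairwise_cons.1 hpw
    rw [List.getLastD_cons]
    simp only [List.foldl_cons]
    cases t with
    | nil => simp
    | cons q t' =>
      rw [ih (max b (a.2 - i0)) i0 a (by simp) htail,
        pvGetLastD_congr (q :: t') (by simp) a d]
      have h1 : a.2 ≤ ((q :: t').getLastD d).2 := by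
        have h2 := pvLastD_max (q :: t') d htail q List.mem_cons_self
        have h3 := hhead q List.mem_cons_self
        omega
      have h4 : max (a.2 - i0) (((q :: t').getLastD d).2 - i0)
          = ((q :: t').getLastD d).2 - i0 := max_eq_right (by omega)
      rw [max_assoc, h4]

lemma pvScan_blocks (P : List Int) : ∀ (D : List Int) (v0 i0 b : Int),
    (∀ v ∈ D, v ∈ P) → (∀ v ∈ D, v0 ≠ v) → D.Pairwise (· < ·) → 0 ≤ b →
    ((D.flatMap (pvBlk P)).foldl pvScanStep (v0, i0, b)).2.2
      = D.foldl (fun a v => max a (pvSpan P v)) b := by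
  intro D
  induction D with
  | nil => intro v0 i0 b _ _ _ _; simp
  | cons v D' ih =>
    intro v0 i0 b hmem hne hpw hb
    obtain ⟨hhead, htail⟩ := List.pairwise_cons.1 hpw
    have hblk := pvBlk_ne_nil P v (hmem v List.mem_cons_self)
    obtain ⟨h0, t, he⟩ := List.exists_cons_of_ne_nil hblk
    have hfst : h0.1 = v := pvBlk_fst P v h0 (he ▸ List.mem_cons_self)
    have hblkpw := pvBlk_pw P v
    rw [he] at hblkpw
    obtain ⟨hbh, hbt⟩ := List.pairwise_cons.1 hblkpw
    simp only [List.flatMap_cons, List.foldl_append]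
    rw [he]
    simp only [List.foldl_cons]
    have hstep : pvScanStep (v0, i0, b) h0 = (v, h0.2, b) := by
      unfold pvScanStep
      rw [hfst]
      rw [if_pos (by simpa using (hne v List.mem_cons_self).symm)]
    rw [hstep]
    rw [pvScan_run v h0.2 t b (fun q hq => pvBlk_fst P v q (he ▸ List.mem_cons_of_mem h0 hq))]
    have hfirst : pvFirst P v = h0.2 := by unfold pvFirst; rw [he]; rfl
    have hlast : pvLast P v = ((h0 :: t).getLastD (0, 0)).2 := by unfold pvLast; rw [he]
    have hspan : t.foldl (fun acc p => max acc (p.2 - h0.2)) b = max b (pvSpan P v) := by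
      cases t with
      | nil =>
        unfold pvSpan
        rw [hfirst, hlast]
        simp only [List.foldl_nil, List.getLastD_cons, List.getLastD_nil]
        rw [max_eq_left (by omega)]
      | cons q t' =>
        rw [pvFoldMax_last (q :: t') b h0.2 h0 (by simp) hbt]
        unfold pvSpan
        rw [hfirst, hlast]
        simp only [List.getLastD_cons]
    rw [hspan]
    rw [ih v h0.2 (max b (pvSpan P v))
      (fun w hw => hmem w (List.mem_cons_of_mem v hw))
      (fun w hw => by have := hhead w hw; omega)
      htail (le_trans hb (le_max_left _ _))]

-- ---- B's value ----
lemma pvB_char (bell : List Int) :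
    solution_alt bell
      = (pvD (pvAccumulate ((0 : Int) :: bell.map (fun b => if b == 1 then -1 else 1)))).foldl
          (fun a v => max a (pvSpan (pvAccumulate ((0 : Int) :: bell.map (fun b => if b == 1 then -1 else 1))) v)) 0 := by
  simp only [solution_alt]
  have hpref : (bell.foldl pvBuild ([(0 : Int)], 0)).1
      = pvAccumulate ((0 : Int) :: bell.map (fun b => if b == 1 then -1 else 1)) := by
    rw [pvBuild_eq]
    rfl
  rw [hpref]
  set P := pvAccumulate ((0 : Int) :: bell.map (fun b => if b == 1 then -1 else 1)) with hP
  have hpairs : (PySem.List.enumerate P 0).map (fun p => (p.2, p.1)) = pvPairs P := rfl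
  rw [hpairs, pvSorted2_eq_T]
  have h0P : (0 : Int) ∈ P := by rw [hP]; simp [pvAccumulate]
  have hDne : pvD P ≠ [] := by
    intro h
    have := (pvD_mem P 0).2 h0P
    rw [h] at this
    simp at this
  obtain ⟨v1, D', heD⟩ := List.exists_cons_of_ne_nil hDne
  have hDpw := pvD_pw P
  rw [heD] at hDpw
  obtain ⟨hDh, hDt⟩ := List.pairwise_cons.1 hDpw
  have hmin : ∀ v ∈ pvD P, v1 ≤ v := by
    intro v hv
    rw [heD] at hv
    rcases List.mem_cons.1 hv with rfl | h
    · exact le_refl v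
    · exact le_of_lt (hDh v h)
  have hblkne := pvBlk_ne_nil P v1 ((pvD_mem P v1).1 (heD ▸ List.mem_cons_self))
  obtain ⟨h0, t, heB⟩ := List.exists_cons_of_ne_nil hblkne
  have hfst : h0.1 = v1 := pvBlk_fst P v1 h0 (heB ▸ List.mem_cons_self)
  have hT : pvT P = h0 :: (t ++ D'.flatMap (pvBlk P)) := by
    unfold pvT
    rw [heD]
    simp only [List.flatMap_cons]
    rw [heB, List.cons_append]
  rw [hT, PySem.List.slice_from_one, PySem.List.pyGetD_zero_cons, List.tail_cons]
  have hfull : (pvT P).foldl pvScanStep (v1 - 1, 0, 0)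
      = (t ++ D'.flatMap (pvBlk P)).foldl pvScanStep (h0.1, h0.2, 0) := by
    rw [hT]
    simp only [List.foldl_cons]
    congr 1
    unfold pvScanStep
    dsimp only
    rw [if_pos (by simp [hfst]; omega)]
  rw [← hfull]
  have hscan := pvScan_blocks P (pvD P) (v1 - 1) 0 0
    (fun v hv => (pvD_mem P v).1 hv)
    (fun v hv => by have := hmin v hv; omega)
    (pvD_pw P) (le_refl 0)
  unfold pvT at hscan
  exact hscan

-- ---- A's dict fold: first/last occurrence characterisation ----
def pvFirstIdx (l : List (Int × Int)) (v : Int) : Option Int :=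
  ((l.filter (fun p => p.2 == v)).head?).map (·.1)

def pvLastIdx (l : List (Int × Int)) (v : Int) : Option Int :=
  ((l.filter (fun p => p.2 == v)).getLast?).map (·.1)

lemma pvA_fold (l : List (Int × Int)) : ∀ (v : Int),
    ((l.foldl pvAStep (PySem.Dict.empty, PySem.Dict.empty)).1.get? v = pvFirstIdx l v) ∧
    ((l.foldl pvAStep (PySem.Dict.empty, PySem.Dict.empty)).2.get? v = pvLastIdx l v) := by
  induction l using List.reverseRecOn with
  | nil =>
    intro v
    constructor <;> simp [pvFirstIdx, pvLastIdx, PySem.Dict.get?_empty]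
  | append_singleton l p ih =>
    intro v
    rw [List.foldl_append, List.foldl_cons, List.foldl_nil]
    set st := List.foldl pvAStep (PySem.Dict.empty, PySem.Dict.empty) l with hst
    have ih1 := fun w => (ih w).1
    have ih2 := fun w => (ih w).2
    have hfilter : (l ++ [p]).filter (fun q => q.2 == v)
        = l.filter (fun q => q.2 == v) ++ (if p.2 = v then [p] else []) := by
      rw [List.filter_append, List.filter_singleton]
      by_cases hv : p.2 = v
      · rw [if_pos hv, show (p.2 == v) = true from by simp [hv]]; rfl
      · rw [if_neg hv, show (p.2 == v) = false from by simp [hv]]; rfl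
    constructor
    · unfold pvAStep
      dsimp only
      unfold pvFirstIdx
      rw [hfilter, List.head?_append]
      by_cases hv : p.2 = v
      · rw [if_pos hv]
        by_cases hc : st.1.contains p.2
        · rw [if_pos hc]
          have hs : (st.1.get? v).isSome := by
            rw [← hv, ← PySem.Dict.contains_eq_isSome_get?]
            exact hc
          rw [ih1 v] at hs ⊢
          unfold pvFirstIdx at hs ⊢
          cases hh : (l.filter (fun q => q.2 == v)).head? with
          | none => rw [hh] at hs; simp at hs
          | some a => simp
        · rw [if_neg hc]
          have hs : st.1.get? v = none := by
            cases hg : st.1.get? v with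
            | none => rfl
            | some a =>
              exfalso
              apply hc
              rw [PySem.Dict.contains_eq_isSome_get?, hv, hg]
              rfl
          have hnil : (l.filter (fun q => q.2 == v)).head? = none := by
            have := (ih1 v).symm.trans hs
            unfold pvFirstIdx at this
            exact Option.map_eq_none_iff.1 this
          rw [hnil]
          rw [← hv, PySem.Dict.get?_insert_self]
          rfl
      · rw [if_neg hv]
        have hor : ((l.filter (fun q => q.2 == v)).head?.or ([] : List (Int × Int)).head?)
            = (l.filter (fun q => q.2 == v)).head? := Option.or_none
        rw [hor]
        by_cases hc : st.1.contains p.2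
        · rw [if_pos hc]
          exact ih1 v
        · rw [if_neg hc]
          rw [PySem.Dict.get?_insert_of_ne _ _ (fun h => hv h.symm)]
          exact ih1 v
    · unfold pvAStep
      dsimp only
      unfold pvLastIdx
      rw [hfilter, List.getLast?_append]
      by_cases hv : p.2 = v
      · rw [if_pos hv]
        rw [show ([p] : List (Int × Int)).getLast? = some p from rfl]
        rw [show (some p).or (l.filter (fun q => q.2 == v)).getLast? = some p from rfl]
        rw [← hv, PySem.Dict.get?_insert_self]
        rfl
      · rw [if_neg hv]
        rw [show (([] : List (Int × Int)).getLast?).or (l.filter (fun q => q.2 == v)).getLast?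
          = (l.filter (fun q => q.2 == v)).getLast? from rfl]
        rw [PySem.Dict.get?_insert_of_ne _ _ (fun h => hv h.symm)]
        exact ih2 v

-- a running max over projections is bounded by any common bound
lemma pvFoldMaxLe (g : Int → Int) : ∀ (l : List Int) (b c : Int), b ≤ c → (∀ v ∈ l, g v ≤ c) →
    l.foldl (fun a v => max a (g v)) b ≤ c := by
  intro l
  induction l with
  | nil => intro b c hb _; simpa using hb
  | cons v t ih =>
    intro b c hb hv
    simp only [List.foldl_cons]
    exact ih (max b (g v)) c (max_le hb (hv v List.mem_cons_self))
      (fun w hw => hv w (List.mem_cons_of_mem v hw))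

-- ---- A's value ----
lemma pvA_char (bell : List Int) :
    solution bell
      = (pvD (pvAccumulate ((0 : Int) :: bell.map (fun b => if b == 1 then -1 else 1)))).foldl
          (fun a v => max a (pvSpan (pvAccumulate ((0 : Int) :: bell.map (fun b => if b == 1 then -1 else 1))) v)) 0 := by
  simp only [solution]
  set P := pvAccumulate ((0 : Int) :: bell.map (fun b => if b == 1 then -1 else 1)) with hP
  set E := PySem.List.enumerate P 0 with hE
  set st := E.foldl pvAStep (PySem.Dict.empty, PySem.Dict.empty) with hst
  have hget1 : ∀ v, st.1.get? v = pvFirstIdx E v := fun v => (pvA_fold E v).1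
  have hget2 : ∀ v, st.2.get? v = pvLastIdx E v := fun v => (pvA_fold E v).2
  have hblk : ∀ v, pvBlk P v = (E.filter (fun q => q.2 == v)).map (fun q => (q.2, q.1)) := by
    intro v
    unfold pvBlk pvPairs
    rw [List.filter_map]
    rfl
  have hmem_iff : ∀ v : Int, (E.filter (fun q => q.2 == v) ≠ []) ↔ v ∈ P := by
    intro v
    constructor
    · intro h
      obtain ⟨q, t, hq⟩ := List.exists_cons_of_ne_nil h
      have hqm : q ∈ E.filter (fun q => q.2 == v) := hq ▸ List.mem_cons_self
      obtain ⟨hqE, hqv⟩ := List.mem_filter.1 hqm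
      have : v ∈ E.map (fun p => p.2) := List.mem_map.2 ⟨q, hqE, by simpa using hqv⟩
      rwa [hE, PySem.List.map_snd_enumerate] at this
    · intro hv
      rw [← PySem.List.map_snd_enumerate P 0, ← hE] at hv
      obtain ⟨q, hqE, hqv⟩ := List.mem_map.1 hv
      intro hnil
      rw [List.filter_eq_nil_iff] at hnil
      exact hnil q hqE (by simp [hqv])
  have hkeys : ∀ v : Int, v ∈ st.2.keys ↔ v ∈ P := by
    intro v
    rw [← PySem.Dict.contains_iff_mem_keys]
    rw [show st.2.contains v = (st.2.get? v).isSome from PySem.Dict.contains_eq_isSome_get? _ _]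
    rw [hget2]
    unfold pvLastIdx
    rw [Option.isSome_map]
    rw [show ((E.filter (fun q => q.2 == v)).getLast?.isSome = true)
      ↔ (E.filter (fun q => q.2 == v) ≠ []) from List.getLast?_isSome]
    exact hmem_iff v
  have hvals : ∀ v ∈ P, st.2.getD v 0 - st.1.getD v 0 = pvSpan P v := by
    intro v hv
    have hne : E.filter (fun q => q.2 == v) ≠ [] := (hmem_iff v).2 hv
    obtain ⟨a, F', hF⟩ := List.exists_cons_of_ne_nil hne
    have hfirst : st.1.getD v 0 = a.1 := by
      rw [PySem.Dict.getD_eq_get?_getD, hget1]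
      unfold pvFirstIdx
      rw [hF]
      rfl
    have hlastO : (E.filter (fun q => q.2 == v)).getLast? = some ((a :: F').getLast (by simp)) := by
      rw [hF]
      exact List.getLast?_eq_some_getLast (by simp)
    have hlast : st.2.getD v 0 = ((a :: F').getLast (by simp)).1 := by
      rw [PySem.Dict.getD_eq_get?_getD, hget2]
      unfold pvLastIdx
      rw [hlastO]
      rfl
    have hBfirst : pvFirst P v = a.1 := by
      unfold pvFirst
      rw [hblk v, hF]
      rfl
    have hBlast : pvLast P v = ((a :: F').getLast (by simp)).1 := by
      unfold pvLast
      rw [hblk v, hF]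
      rw [List.getLastD_eq_getLast?, List.getLast?_map]
      rw [show (a :: F').getLast? = some ((a :: F').getLast (by simp)) from
        List.getLast?_eq_some_getLast (by simp)]
      rfl
    unfold pvSpan
    rw [hfirst, hlast, hBfirst, hBlast]
  have hmapeq : st.2.keys.map (fun x => st.2.getD x 0 - st.1.getD x 0)
      = st.2.keys.map (pvSpan P) :=
    List.map_congr_left (fun x hx => hvals x ((hkeys x).1 hx))
  rw [hmapeq]
  have h0P : (0 : Int) ∈ P := by rw [hP]; simp [pvAccumulate]
  have hkne : st.2.keys ≠ [] := List.ne_nil_of_mem ((hkeys 0).2 h0P)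
  cases hm : PySem.List.max? (st.2.keys.map (pvSpan P)) (fun v => v) with
  | none =>
    exfalso
    rw [PySem.List.max?_eq_none_iff] at hm
    exact hkne (List.map_eq_nil_iff.1 hm)
  | some m =>
    rw [Option.getD_some]
    obtain ⟨x, hxk, hxm⟩ := List.mem_map.1 (PySem.List.max?_mem hm)
    have hxP : x ∈ P := (hkeys x).1 hxk
    have hmax := PySem.List.max?_isMax hm
    have hm_nonneg : 0 ≤ m := hxm ▸ pvSpan_nonneg P x hxP
    have h1 : m ≤ (pvD P).foldl (fun a v => max a (pvSpan P v)) 0 := by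
      rw [← hxm]
      exact (PySem.List.le_foldl_max_int (pvD P) (pvSpan P) 0).2 x ((pvD_mem P x).2 hxP)
    have h2 : (pvD P).foldl (fun a v => max a (pvSpan P v)) 0 ≤ m := by
      apply pvFoldMaxLe
      · exact hm_nonneg
      · intro v hv
        have hvP : v ∈ P := (pvD_mem P v).1 hv
        exact hmax (pvSpan P v) (List.mem_map_of_mem ((hkeys v).2 hvP))
    omega

-- ===== VERDICT (by name: the statement is the Claim_ definition above) =====
theorem solution_spec : Claim_equal_solution := by
  intro bell _
  unfold Spec_solution
  rw [pvA_char, pvB_char]
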